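-- pv_equiv track=rewrite | github.com/badesrapankaj/Audit_Dashboard | utils_shared.py | sheet_key_match
-- ===== SOURCE A (Python) =====
-- from typing import Dict, List, Tuple, Optional
--
-- EXPECTED_SHEETS_AUDIT = {
--     "policy_norms": ["policy norms"],
--     "pd_fi_tvr_hca": ["pd fi tvr-hca", "pd fi tvr hca", "pd fi", "tvr-hca"],
--     "kyc_loan_kits": ["kyc and loan kit", "kyc & loan kit", "kyc loan kit"],
--     "prs_assessment": ["prs assessment", "pvr assessment"],
-- }
--
-- def sheet_key_match(sheet_names: List[str]) -> Dict[str, str]: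
--     found: Dict[str, str] = {}
--     collapsed_map: Dict[str, str] = {}
--     for s in sheet_names:
--         key = s.lower().replace("&", "and").replace("-", " ").replace("_", " ").strip()
--         key = " ".join(key.split())
--         collapsed_map[key] = s
--     for key, variants in EXPECTED_SHEETS_AUDIT.items():
--         for v in variants:
--             for collapsed, original in collapsed_map.items():
--                 if v == collapsed:
--                     found[key] = original
--                     break
--             if key in found:
--                 break
--     return found
-- ===== SOURCE B (Python) =====
-- from typing import Dict, List
--
-- EXPECTED_SHEETS_AUDIT = {
--     "policy_norms": ["policy norms"],
--     "pd_fi_tvr_hca": ["pd fi tvr-hca", "pd fi tvr hca", "pd fi", "tvr-hca"],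
--     "kyc_loan_kits": ["kyc and loan kit", "kyc & loan kit", "kyc loan kit"],
--     "prs_assessment": ["prs assessment", "pvr assessment"],
-- }
--
-- def sheet_key_match(sheet_names: List[str]) -> Dict[str, str]:
--     # index: variant string -> (expected key, rank of the variant within that key's list)
--     rank: Dict[str, tuple] = {}
--     for key, variants in EXPECTED_SHEETS_AUDIT.items():
--         for i, v in enumerate(variants):
--             rank[v] = (key, i)
--     collapsed_map: Dict[str, str] = {}
--     for s in sheet_names:
--         k = s.lower().replace("&", "and").replace("-", " ").replace("_", " ").strip()
--         collapsed_map[" ".join(k.split())] = s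
--     # one pass over the collapsed names, keeping the lowest-rank hit per key
--     best: Dict[str, tuple] = {}
--     for collapsed, original in collapsed_map.items():
--         hit = rank.get(collapsed)
--         if hit is not None:
--             key, i = hit
--             if key not in best or i < best[key][0]:
--                 best[key] = (i, original)
--     return {key: best[key][1] for key in EXPECTED_SHEETS_AUDIT if key in best}
-- ===== Notes on version B (the rewrite author's own statement) =====
-- stated objective: alternative
-- what changed: Replaces A's per-key scan over variants with a nested scan of the collapsed map by a prebuilt variant->(key,rank) index and a single min-rank pass over the collapsed names.
import Mathlib
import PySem

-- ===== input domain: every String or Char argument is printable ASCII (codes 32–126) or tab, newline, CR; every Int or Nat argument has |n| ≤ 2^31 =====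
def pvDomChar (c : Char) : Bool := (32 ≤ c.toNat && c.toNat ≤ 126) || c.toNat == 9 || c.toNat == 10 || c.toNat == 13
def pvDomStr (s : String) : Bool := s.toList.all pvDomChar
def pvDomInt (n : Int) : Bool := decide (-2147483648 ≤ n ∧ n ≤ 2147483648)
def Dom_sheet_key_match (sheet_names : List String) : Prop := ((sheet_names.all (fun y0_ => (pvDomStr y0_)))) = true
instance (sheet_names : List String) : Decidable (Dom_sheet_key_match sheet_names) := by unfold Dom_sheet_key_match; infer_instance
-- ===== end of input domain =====

-- B replaces A's per-key nested scans with a variant->(key,rank) index plus one min-rank pass over the collapsed names; same results, alternative structure (no speed claim).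


-- ===== PORT A =====
-- module-level constant shared by both Pythons
def EXPECTED_SHEETS_AUDIT : PySem.Dict String (List String) :=
  PySem.Dict.ofList
    [("policy_norms", ["policy norms"]),
     ("pd_fi_tvr_hca", ["pd fi tvr-hca", "pd fi tvr hca", "pd fi", "tvr-hca"]),
     ("kyc_loan_kits", ["kyc and loan kit", "kyc & loan kit", "kyc loan kit"]),
     ("prs_assessment", ["prs assessment", "pvr assessment"])]

-- the normalization line, identical in A and B
def pvNormKey (s : String) : String :=
  let key := PySem.Str.strip ((((PySem.Str.lower s).replace "&" "and").replace "-" " ").replace "_" " ")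
  PySem.Str.join " " (PySem.Str.split₀ key)

-- inner loop: 'for collapsed, original in collapsed_map.items(): if v == collapsed: …; break'
def pvInnerScan (v : String) : List (String × String) → Option String
  | [] => none
  | (c, o) :: rest => if v == c then some o else pvInnerScan v rest

-- 'for v in variants: … ; if key in found: break'
def pvScanVariants (items : List (String × String)) (key : String) :
    PySem.Dict String String → List String → PySem.Dict String String
  | found, [] => found
  | found, v :: rest =>
    let found' := match pvInnerScan v items with
      | some o => found.insert key o
      | none => found
    if found'.contains key then found' else pvScanVariants items key found' rest

def sheet_key_match (sheet_names : List String) : List (String × String) :=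
  let collapsed_map := sheet_names.foldl (fun d s => d.insert (pvNormKey s) s) PySem.Dict.empty
  let found := EXPECTED_SHEETS_AUDIT.items.foldl
      (fun found kv => pvScanVariants collapsed_map.items kv.1 found kv.2) PySem.Dict.empty
  found.items

-- ===== PORT B =====
-- rank[v] = (key, i) for each variant
def pvRank : PySem.Dict String (String × Int) :=
  EXPECTED_SHEETS_AUDIT.items.foldl
    (fun d kv => (PySem.List.enumerate kv.2).foldl (fun d iv => d.insert iv.2 (kv.1, iv.1)) d)
    PySem.Dict.empty

-- body of B's single pass over collapsed_map.items()
def pvStep (b : PySem.Dict String (Int × String)) (co : String × String) :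
    PySem.Dict String (Int × String) :=
  match pvRank.get? co.1 with
  | some ki =>
    match b.get? ki.1 with
    | some jw => if ki.2 < jw.1 then b.insert ki.1 (ki.2, co.2) else b
    | none => b.insert ki.1 (ki.2, co.2)
  | none => b

def sheet_key_match_alt (sheet_names : List String) : List (String × String) :=
  let collapsed_map := sheet_names.foldl (fun d s => d.insert (pvNormKey s) s) PySem.Dict.empty
  let best := collapsed_map.items.foldl pvStep PySem.Dict.empty
  (EXPECTED_SHEETS_AUDIT.items.foldl
    (fun res kv => match best.get? kv.1 with
      | some iw => res.insert kv.1 iw.2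
      | none => res) PySem.Dict.empty).items

-- ===== PRECONDITION & SPEC =====
def Spec_sheet_key_match (sheet_names : List String) (out : List (String × String)) : Prop := out = sheet_key_match_alt sheet_names
instance (sheet_names : List String) (out : List (String × String)) : Decidable (Spec_sheet_key_match sheet_names out) := by unfold Spec_sheet_key_match; infer_instance

-- ===== CLAIM (what is proved, stated in full; the proofs are below) =====
def Claim_equal_sheet_key_match : Prop := ∀ (sheet_names : List String), Dom_sheet_key_match sheet_names → Spec_sheet_key_match sheet_names (sheet_key_match sheet_names)

-- ===== LEMMAS AND PROOFS =====

-- A's search for one key, with the rank of the winning variant made explicit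
def pvAFind (items : List (String × String)) : Int → List String → Option (Int × String)
  | _, [] => none
  | i, v :: rest =>
    match pvInnerScan v items with
    | some o => some (i, o)
    | none => pvAFind items (i + 1) rest

-- index of v in a variant list, counting from i
def pvIdxFrom (v : String) : Int → List String → Option Int
  | _, [] => none
  | i, u :: rest => if u == v then some i else pvIdxFrom v (i + 1) rest

-- how one snoc'd item updates a best-so-far entry
def pvUpd (old : Option (Int × String)) (r : Option Int) (val : String) : Option (Int × String) :=
  match r with
  | none => old
  | some i =>
    match old with
    | none => some (i, val)
    | some jw => if i < jw.1 then some (i, val) else old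

-- rank restricted to one expected key
def pvRankFor (k v : String) : Option Int :=
  match pvRank.get? v with
  | some ki => if ki.1 = k then some ki.2 else none
  | none => none

theorem pvAFind_nil (i : Int) (vs : List String) : pvAFind [] i vs = none := by
  induction vs generalizing i with
  | nil => rfl
  | cons v rest ih => simp [pvAFind, pvInnerScan, ih]

theorem pvAFind_lb (items : List (String × String)) (i : Int) (vs : List String)
    (jw : Int × String) (h : pvAFind items i vs = some jw) : i ≤ jw.1 := by
  induction vs generalizing i with
  | nil => simp [pvAFind] at h
  | cons v rest ih =>
    simp only [pvAFind] at h
    cases hs : pvInnerScan v items with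
    | some o => rw [hs] at h; cases h; rfl
    | none => rw [hs] at h; have := ih (i + 1) h; omega

theorem pvIdxFrom_lb (v : String) (i : Int) (vs : List String)
    (j : Int) (h : pvIdxFrom v i vs = some j) : i ≤ j := by
  induction vs generalizing i with
  | nil => simp [pvIdxFrom] at h
  | cons u rest ih =>
    simp only [pvIdxFrom] at h
    by_cases hu : u == v
    · rw [if_pos hu] at h; cases h; rfl
    · rw [if_neg hu] at h; have := ih (i + 1) h; omega

theorem pvInnerScan_snoc (v : String) (items : List (String × String)) (x : String × String) :
    pvInnerScan v (items ++ [x]) =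
      match pvInnerScan v items with
      | some o => some o
      | none => if v == x.1 then some x.2 else none := by
  induction items with
  | nil => simp [pvInnerScan]
  | cons p rest ih =>
    obtain ⟨c, o⟩ := p
    by_cases h : v == c <;> simp [pvInnerScan, h, ih]

theorem pvAFind_snoc (items : List (String × String)) (x : String × String)
    (i : Int) (vs : List String) :
    pvAFind (items ++ [x]) i vs = pvUpd (pvAFind items i vs) (pvIdxFrom x.1 i vs) x.2 := by
  induction vs generalizing i with
  | nil => rfl
  | cons v rest ih =>
    simp only [pvAFind, pvIdxFrom, pvInnerScan_snoc]
    cases hs : pvInnerScan v items with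
    | some o =>
      by_cases hv : (v == x.1) = true
      · simp [pvUpd, hv]
      · simp only [Bool.not_eq_true] at hv
        cases hr : pvIdxFrom x.1 (i + 1) rest with
        | none => simp [pvUpd, hv]
        | some j =>
          have hij : i + 1 ≤ j := pvIdxFrom_lb _ _ _ _ hr
          simp [pvUpd, hv, show ¬ j < i by omega]
    | none =>
      by_cases hv : (v == x.1) = true
      · cases hr : pvAFind items (i + 1) rest with
        | none => simp [pvUpd, hv]
        | some jw =>
          have hij : i + 1 ≤ jw.1 := pvAFind_lb _ _ _ _ hr
          simp [pvUpd, hv, show i < jw.1 by omega]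
      · simp only [Bool.not_eq_true] at hv
        simpa [hv] using ih (i + 1)


def pvRankTable : List (String × (String × Int)) :=
  [("policy norms", ("policy_norms", 0)),
   ("pd fi tvr-hca", ("pd_fi_tvr_hca", 0)), ("pd fi tvr hca", ("pd_fi_tvr_hca", 1)),
   ("pd fi", ("pd_fi_tvr_hca", 2)), ("tvr-hca", ("pd_fi_tvr_hca", 3)),
   ("kyc and loan kit", ("kyc_loan_kits", 0)), ("kyc & loan kit", ("kyc_loan_kits", 1)),
   ("kyc loan kit", ("kyc_loan_kits", 2)),
   ("prs assessment", ("prs_assessment", 0)), ("pvr assessment", ("prs_assessment", 1))]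

theorem rank_get (v : String) : pvRank.get? v =
    if "policy norms" = v then some ("policy_norms", (0:Int))
    else if "pd fi tvr-hca" = v then some ("pd_fi_tvr_hca", 0)
    else if "pd fi tvr hca" = v then some ("pd_fi_tvr_hca", 1)
    else if "pd fi" = v then some ("pd_fi_tvr_hca", 2)
    else if "tvr-hca" = v then some ("pd_fi_tvr_hca", 3)
    else if "kyc and loan kit" = v then some ("kyc_loan_kits", 0)
    else if "kyc & loan kit" = v then some ("kyc_loan_kits", 1)
    else if "kyc loan kit" = v then some ("kyc_loan_kits", 2)
    else if "prs assessment" = v then some ("prs_assessment", 0)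
    else if "pvr assessment" = v then some ("prs_assessment", 1)
    else none := by
  rw [show pvRank = PySem.Dict.mk pvRankTable from by decide]
  simp [pvRankTable, PySem.Dict.get?_mk_cons,
    show (PySem.Dict.mk ([] : List (String × (String × Int)))).get? v = none from rfl]

theorem rankFor_k1 (v : String) :
    pvRankFor "policy_norms" v = pvIdxFrom v 0 ["policy norms"] := by
  unfold pvRankFor; rw [rank_get]; split_ifs <;> subst_vars <;> first | decide | simp_all [pvIdxFrom, beq_iff_eq]

theorem rankFor_k2 (v : String) :
    pvRankFor "pd_fi_tvr_hca" v = pvIdxFrom v 0 ["pd fi tvr-hca", "pd fi tvr hca", "pd fi", "tvr-hca"] := by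
  unfold pvRankFor; rw [rank_get]; split_ifs <;> subst_vars <;> first | decide | simp_all [pvIdxFrom, beq_iff_eq]

theorem rankFor_k3 (v : String) :
    pvRankFor "kyc_loan_kits" v = pvIdxFrom v 0 ["kyc and loan kit", "kyc & loan kit", "kyc loan kit"] := by
  unfold pvRankFor; rw [rank_get]; split_ifs <;> subst_vars <;> first | decide | simp_all [pvIdxFrom, beq_iff_eq]

theorem rankFor_k4 (v : String) :
    pvRankFor "prs_assessment" v = pvIdxFrom v 0 ["prs assessment", "pvr assessment"] := by
  unfold pvRankFor; rw [rank_get]; split_ifs <;> subst_vars <;> first | decide | simp_all [pvIdxFrom, beq_iff_eq]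

theorem step_get (b : PySem.Dict String (Int × String)) (x : String × String) (k : String) :
    (pvStep b x).get? k = pvUpd (b.get? k) (pvRankFor k x.1) x.2 := by
  unfold pvStep pvRankFor
  cases h : pvRank.get? x.1 with
  | none => simp [pvUpd]
  | some ki =>
    by_cases hk : ki.1 = k
    · subst hk
      cases hb : b.get? ki.1 with
      | none => simp [pvUpd, hb, PySem.Dict.get?_insert_self]
      | some jw =>
        by_cases hlt : ki.2 < jw.1
        · simp [pvUpd, hb, hlt, PySem.Dict.get?_insert_self]
        · simp [pvUpd, hb, hlt]
    · have hne : k ≠ ki.1 := fun h => hk h.symm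
      cases hb : b.get? ki.1 with
      | none => simp [pvUpd, hb, hk, PySem.Dict.get?_insert_of_ne _ _ hne]
      | some jw =>
        by_cases hlt : ki.2 < jw.1 <;>
          simp [pvUpd, hb, hk, hlt, PySem.Dict.get?_insert_of_ne _ _ hne]

theorem pvScan_char_aux (items : List (String × String)) (k : String) (vs : List String) :
    ∀ (found : PySem.Dict String String) (i : Int), found.contains k = false →
      pvScanVariants items k found vs =
        (match pvAFind items i vs with
          | some io => found.insert k io.2
          | none => found) := by
  induction vs with
  | nil => intro found i h; rfl
  | cons v rest ih =>
    intro found i h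
    simp only [pvScanVariants, pvAFind]
    cases hs : pvInnerScan v items with
    | some o => simp [PySem.Dict.contains_insert_self]
    | none =>
      rw [if_neg (by simp [h])]
      exact ih found (i + 1) h

def pvOptIns (found : PySem.Dict String String) (k : String) (o : Option (Int × String)) :
    PySem.Dict String String :=
  match o with
  | some io => found.insert k io.2
  | none => found

theorem pvScan_char (items : List (String × String)) (k : String)
    (found : PySem.Dict String String) (vs : List String)
    (h : found.contains k = false) :
    pvScanVariants items k found vs = pvOptIns found k (pvAFind items 0 vs) :=
  pvScan_char_aux items k vs found 0 h

theorem best_char (items : List (String × String)) :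
    (items.foldl pvStep PySem.Dict.empty).get? "policy_norms" = pvAFind items 0 ["policy norms"] ∧
    (items.foldl pvStep PySem.Dict.empty).get? "pd_fi_tvr_hca" = pvAFind items 0 ["pd fi tvr-hca", "pd fi tvr hca", "pd fi", "tvr-hca"] ∧
    (items.foldl pvStep PySem.Dict.empty).get? "kyc_loan_kits" = pvAFind items 0 ["kyc and loan kit", "kyc & loan kit", "kyc loan kit"] ∧
    (items.foldl pvStep PySem.Dict.empty).get? "prs_assessment" = pvAFind items 0 ["prs assessment", "pvr assessment"] := by
  induction items using List.reverseRecOn with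
  | nil => simp [pvAFind_nil, PySem.Dict.get?_empty]
  | append_singleton items x ih =>
    obtain ⟨h1, h2, h3, h4⟩ := ih
    rw [List.foldl_append]
    simp only [List.foldl_cons, List.foldl_nil]
    refine ⟨?_, ?_, ?_, ?_⟩
    · rw [step_get, h1, rankFor_k1, pvAFind_snoc]
    · rw [step_get, h2, rankFor_k2, pvAFind_snoc]
    · rw [step_get, h3, rankFor_k3, pvAFind_snoc]
    · rw [step_get, h4, rankFor_k4, pvAFind_snoc]


theorem expected_items : EXPECTED_SHEETS_AUDIT.items =
    [("policy_norms", ["policy norms"]),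
     ("pd_fi_tvr_hca", ["pd fi tvr-hca", "pd fi tvr hca", "pd fi", "tvr-hca"]),
     ("kyc_loan_kits", ["kyc and loan kit", "kyc & loan kit", "kyc loan kit"]),
     ("prs_assessment", ["prs assessment", "pvr assessment"])] := by decide

theorem main_aux (items : List (String × String)) :
    (EXPECTED_SHEETS_AUDIT.items.foldl
        (fun found kv => pvScanVariants items kv.1 found kv.2) PySem.Dict.empty).items
    = (EXPECTED_SHEETS_AUDIT.items.foldl
        (fun res kv =>
          match (items.foldl pvStep PySem.Dict.empty).get? kv.1 with
          | some iw => res.insert kv.1 iw.2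
          | none => res) PySem.Dict.empty).items := by
  obtain ⟨h1, h2, h3, h4⟩ := best_char items
  rw [expected_items]
  simp only [List.foldl_cons, List.foldl_nil]
  rw [h1, h2, h3, h4]
  rw [pvScan_char items "policy_norms" PySem.Dict.empty ["policy norms"]
      (by simp [PySem.Dict.contains_empty])]
  rw [pvScan_char items "pd_fi_tvr_hca"
      (pvOptIns PySem.Dict.empty "policy_norms" (pvAFind items 0 ["policy norms"]))
      ["pd fi tvr-hca", "pd fi tvr hca", "pd fi", "tvr-hca"]
      (by cases pvAFind items 0 ["policy norms"] <;>
        simp [pvOptIns, PySem.Dict.contains_insert, PySem.Dict.contains_empty])]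
  rw [pvScan_char items "kyc_loan_kits"
      (pvOptIns (pvOptIns PySem.Dict.empty "policy_norms" (pvAFind items 0 ["policy norms"]))
        "pd_fi_tvr_hca" (pvAFind items 0 ["pd fi tvr-hca", "pd fi tvr hca", "pd fi", "tvr-hca"]))
      ["kyc and loan kit", "kyc & loan kit", "kyc loan kit"]
      (by cases pvAFind items 0 ["policy norms"] <;>
        cases pvAFind items 0 ["pd fi tvr-hca", "pd fi tvr hca", "pd fi", "tvr-hca"] <;>
        simp [pvOptIns, PySem.Dict.contains_insert, PySem.Dict.contains_empty])]
  rw [pvScan_char items "prs_assessment"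
      (pvOptIns (pvOptIns (pvOptIns PySem.Dict.empty "policy_norms"
          (pvAFind items 0 ["policy norms"]))
        "pd_fi_tvr_hca" (pvAFind items 0 ["pd fi tvr-hca", "pd fi tvr hca", "pd fi", "tvr-hca"]))
        "kyc_loan_kits" (pvAFind items 0 ["kyc and loan kit", "kyc & loan kit", "kyc loan kit"]))
      ["prs assessment", "pvr assessment"]
      (by cases pvAFind items 0 ["policy norms"] <;>
        cases pvAFind items 0 ["pd fi tvr-hca", "pd fi tvr hca", "pd fi", "tvr-hca"] <;>
        cases pvAFind items 0 ["kyc and loan kit", "kyc & loan kit", "kyc loan kit"] <;>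
        simp [pvOptIns, PySem.Dict.contains_insert, PySem.Dict.contains_empty])]
  cases pvAFind items 0 ["policy norms"] <;>
    cases pvAFind items 0 ["pd fi tvr-hca", "pd fi tvr hca", "pd fi", "tvr-hca"] <;>
    cases pvAFind items 0 ["kyc and loan kit", "kyc & loan kit", "kyc loan kit"] <;>
    cases pvAFind items 0 ["prs assessment", "pvr assessment"] <;>
    simp [pvOptIns]

-- ===== VERDICT (by name: the statement is the Claim_ definition above) =====
theorem sheet_key_match_spec : Claim_equal_sheet_key_match := by
  intro sheet_names _
  unfold Spec_sheet_key_match sheet_key_match sheet_key_match_alt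
  exact main_aux _
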